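-- pv_equiv track=rewrite | github.com/zhenhaoge/ukrainian-tts | sofw/utils.py | convert_symbol
-- ===== SOURCE A (Python) =====
-- def convert_symbol(text, l1, l2, quote='"'):
--   """convert symbol l1 to l2 if inside quote"""
--   text2 = ''
--   inside = False
--   for c in text:
--     if c == quote:
--       inside = not inside
--     elif c == l1:
--       if inside:
--         text2 += l2
--       else:
--         text2 += l1
--     else:
--        text2 += c
--   return text2
-- ===== SOURCE B (Python) =====
-- def convert_symbol(text, l1, l2, quote='"'):
--   """convert symbol l1 to l2 if inside quote (segment-based: split on the
--   quote character; the odd-indexed segments are the quoted regions).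
--   Quotes are single characters; for any other quote no character of text
--   can match it, so the text comes back unchanged."""
--   if len(quote) != 1:
--     return text
--   parts = text.split(quote)
--   converted = [''.join(l2 if c == l1 else c for c in seg) if i % 2 == 1 else seg
--                for i, seg in enumerate(parts)]
--   return ''.join(converted)
-- ===== Notes on version B (the rewrite author's own statement) =====
-- stated objective: idiomatic
-- what changed: Replaces the character-level inside/outside state machine by a split-on-quote decomposition: the odd-indexed segments of text.split(quote) are the quoted regions and only their matching characters are rewritten, then everything is joined back.
import Mathlib
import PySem

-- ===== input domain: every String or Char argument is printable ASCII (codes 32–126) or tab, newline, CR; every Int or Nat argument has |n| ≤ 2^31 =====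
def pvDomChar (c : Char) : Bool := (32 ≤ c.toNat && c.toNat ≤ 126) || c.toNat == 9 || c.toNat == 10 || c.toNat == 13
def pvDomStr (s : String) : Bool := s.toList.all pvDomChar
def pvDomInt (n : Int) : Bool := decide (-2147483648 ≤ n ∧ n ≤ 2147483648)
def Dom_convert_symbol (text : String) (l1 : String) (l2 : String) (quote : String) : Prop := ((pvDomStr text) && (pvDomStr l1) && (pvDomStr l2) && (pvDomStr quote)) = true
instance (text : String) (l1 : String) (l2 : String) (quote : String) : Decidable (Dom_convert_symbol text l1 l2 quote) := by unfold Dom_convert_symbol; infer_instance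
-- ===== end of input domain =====

-- B replaces A's character-level inside/outside state machine by the idiomatic
-- split-on-quote decomposition (odd segments are the quoted regions); same cost.


-- ===== PORT A =====
-- literal port of A: one pass over the characters, a Bool 'inside' toggled at
-- each quote character, output accumulated left to right (as a List Char).
def convert_symbol (text : String) (l1 : String) (l2 : String) (quote : String) : String :=
  String.ofList
    ((text.toList.foldl
      (fun (st : List Char × Bool) (c : Char) =>
        if [c] = quote.toList then (st.1, !st.2)
        else if [c] = l1.toList then
          (if st.2 then (st.1 ++ l2.toList, st.2) else (st.1 ++ l1.toList, st.2))
        else (st.1 ++ [c], st.2))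
      ([], false)).1)

-- ===== PORT B =====
-- ''.join(l2 if c == l1 else c for c in seg)
def pvSegConv (l1 : String) (l2 : String) (seg : List Char) : List Char :=
  seg.flatMap (fun c => if [c] = l1.toList then l2.toList else [c])

def convert_symbol_alt (text : String) (l1 : String) (l2 : String) (quote : String) : String :=
  if quote.toList.length ≠ 1 then text
  else
    String.ofList
      (((PySem.List.enumerate (PySem.Chars.splitOn text.toList quote.toList)).map
          (fun ip => if ip.1 % 2 = 1 then pvSegConv l1 l2 ip.2 else ip.2)).flatten)

-- ===== PRECONDITION & SPEC =====
def Spec_convert_symbol (text : String) (l1 : String) (l2 : String) (quote : String) (out : String) : Prop := out = convert_symbol_alt text l1 l2 quote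
instance (text : String) (l1 : String) (l2 : String) (quote : String) (out : String) : Decidable (Spec_convert_symbol text l1 l2 quote out) := by unfold Spec_convert_symbol; infer_instance

-- ===== CLAIM (what is proved, stated in full; the proofs are below) =====
def Claim_equal_convert_symbol : Prop := ∀ (text : String) (l1 : String) (l2 : String) (quote : String), Dom_convert_symbol text l1 l2 quote → Spec_convert_symbol text l1 l2 quote (convert_symbol text l1 l2 quote)

-- ===== LEMMAS AND PROOFS =====

-- A's loop body, as a structural recursion producing only the appended output.
def pvACore (l1 l2 quote : String) : List Char → Bool → List Char
  | [], _ => []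
  | c :: cs, ins =>
    if [c] = quote.toList then pvACore l1 l2 quote cs (!ins)
    else if [c] = l1.toList then
      (if ins then l2.toList else l1.toList) ++ pvACore l1 l2 quote cs ins
    else c :: pvACore l1 l2 quote cs ins

-- simple single-char splitter
def pvSpl (q : Char) : List Char → List (List Char)
  | [] => [[]]
  | c :: cs =>
    if c = q then [] :: pvSpl q cs
    else
      match pvSpl q cs with
      | [] => [[c]]      -- unreachable
      | h :: t => (c :: h) :: t

theorem pvSpl_ne_nil (q : Char) (cs : List Char) : pvSpl q cs ≠ [] := by
  induction cs with
  | nil => simp [pvSpl]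
  | cons c cs ih =>
    simp only [pvSpl]
    split
    · simp
    · cases h : pvSpl q cs with
      | nil => simp
      | cons a t => simp

theorem pvSplitOn_go_eq (q : Char) (cs : List Char) :
    ∀ (fuel : Nat) (cur : List Char) (acc : List (List Char)), cs.length < fuel →
      PySem.Chars.splitOn.go [q] fuel cs cur acc =
        acc.reverse ++ ((pvSpl q cs).modifyHead (cur.reverse ++ ·)) := by
  induction cs with
  | nil =>
    intro fuel cur acc h
    match fuel, h with
    | fuel + 1, _ => simp [PySem.Chars.splitOn.go, pvSpl]
  | cons c cs ih =>
    intro fuel cur acc h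
    match fuel, h with
    | fuel + 1, h =>
      simp only [List.length_cons, Nat.succ_lt_succ_iff] at h
      by_cases hc : c = q
      · subst hc
        have hpre : List.isPrefixOf [c] (c :: cs) = true := by
          simp [List.isPrefixOf]
        simp only [PySem.Chars.splitOn.go, hpre, if_true, List.length_cons,
          List.length_nil, List.drop_succ_cons, List.drop_zero]
        rw [ih fuel [] (cur.reverse :: acc) h]
        simp only [pvSpl]
        cases pvSpl c cs <;> simp
      · have hpre : List.isPrefixOf [q] (c :: cs) = false := by
          simp [List.isPrefixOf]
          exact fun h' => hc h'.symm
        simp only [PySem.Chars.splitOn.go, hpre, Bool.false_eq_true, if_false]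
        rw [ih fuel (c :: cur) acc h]
        simp only [pvSpl, if_neg hc]
        cases hs : pvSpl q cs with
        | nil => exact absurd hs (pvSpl_ne_nil q cs)
        | cons a t => simp

theorem pvSplitOn_eq (q : Char) (cs : List Char) :
    PySem.Chars.splitOn cs [q] = pvSpl q cs := by
  have h := pvSplitOn_go_eq q cs (cs.length + 1) [] [] (by omega)
  rw [PySem.Chars.splitOn, h]
  cases hs : pvSpl q cs with
  | nil => exact absurd hs (pvSpl_ne_nil q cs)
  | cons a t => simp

-- parity-driven join of the segments (what B computes, with ins = (index odd))
def pvJoinParts (l1 l2 : String) : List (List Char) → Bool → List Char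
  | [], _ => []
  | h :: t, ins =>
    (if ins then pvSegConv l1 l2 h else h) ++ pvJoinParts l1 l2 t (!ins)

theorem pvACore_eq_joinParts (l1 l2 quote : String) (q : Char)
    (hq : quote.toList = [q]) (cs : List Char) :
    ∀ ins, pvACore l1 l2 quote cs ins = pvJoinParts l1 l2 (pvSpl q cs) ins := by
  induction cs with
  | nil => intro ins; simp [pvACore, pvSpl, pvJoinParts, pvSegConv]
  | cons c cs ih =>
    intro ins
    by_cases hc : c = q
    · have h1 : [c] = quote.toList := by rw [hq, hc]
      simp only [pvACore, if_pos h1, pvSpl, if_pos hc]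
      rw [ih (!ins)]
      simp [pvJoinParts, pvSegConv]
    · have h1 : ¬ [c] = quote.toList := by rw [hq]; simp [hc]
      simp only [pvACore, if_neg h1, pvSpl, if_neg hc]
      cases hs : pvSpl q cs with
      | nil => exact absurd hs (pvSpl_ne_nil q cs)
      | cons h t =>
        have ihh := ih ins
        rw [hs] at ihh
        simp only [pvJoinParts] at ihh ⊢
        by_cases hl : [c] = l1.toList
        · cases ins with
          | false =>
            simp only [Bool.false_eq_true, if_false, if_pos hl] at *
            rw [ihh]
            exact congrArg (fun x => x ++ (h ++ pvJoinParts l1 l2 t true))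
              (by rw [← hl]) |>.trans (by simp)
          | true =>
            simp only [if_pos hl, if_true] at *
            rw [ihh]
            simp [pvSegConv, List.flatMap_cons, if_pos hl]
        · cases ins with
          | false =>
            simp only [if_neg hl, Bool.false_eq_true, if_false] at *
            simp [ihh]
          | true =>
            simp only [if_neg hl, if_true] at *
            rw [ihh]
            simp [pvSegConv, List.flatMap_cons, if_neg hl]

-- B's enumerate/map/flatten equals the parity-driven join (indices from n ≥ 0)
theorem pvEnum_eq_joinParts (l1 l2 : String) (parts : List (List Char)) :
    ∀ (n : Int), 0 ≤ n →
      ((PySem.List.enumerate parts n).map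
          (fun ip => if ip.1 % 2 = 1 then pvSegConv l1 l2 ip.2 else ip.2)).flatten =
        pvJoinParts l1 l2 parts (decide (n % 2 = 1)) := by
  induction parts with
  | nil => intro n _; simp [PySem.List.enumerate, pvJoinParts]
  | cons h t ih =>
    intro n hn
    rw [PySem.List.enumerate_cons]
    simp only [List.map_cons, List.flatten_cons]
    rw [ih (n + 1) (by omega)]
    simp only [pvJoinParts]
    congr 1
    · by_cases hm : n % 2 = 1 <;> simp [hm]
    · congr 1
      by_cases hm : n % 2 = 1
      · have h2 : (n + 1) % 2 = 0 := by omega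
        simp [hm, h2]
      · have h2 : (n + 1) % 2 = 1 := by omega
        simp [hm, h2]

-- A's foldl with accumulator = acc ++ pvACore
theorem pvFoldl_eq_acore (l1 l2 quote : String) (cs : List Char) :
    ∀ (acc : List Char) (ins : Bool),
      (cs.foldl
        (fun (st : List Char × Bool) (c : Char) =>
          if [c] = quote.toList then (st.1, !st.2)
          else if [c] = l1.toList then
            (if st.2 then (st.1 ++ l2.toList, st.2) else (st.1 ++ l1.toList, st.2))
          else (st.1 ++ [c], st.2)) (acc, ins)).1 =
      acc ++ pvACore l1 l2 quote cs ins := by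
  induction cs with
  | nil => intro acc ins; simp [pvACore]
  | cons c cs ih =>
    intro acc ins
    simp only [List.foldl_cons, pvACore]
    by_cases hq : [c] = quote.toList
    · rw [if_pos hq, if_pos hq, ih]
    · rw [if_neg hq, if_neg hq]
      by_cases hl : [c] = l1.toList
      · rw [if_pos hl, if_pos hl]
        cases ins with
        | true =>
          rw [if_pos rfl, if_pos rfl, ih]
          simp
        | false =>
          rw [if_neg (by simp), if_neg (by simp), ih]
          simp
      · rw [if_neg hl, if_neg hl, ih]
        simp

-- when quote is not a single character, A (started outside) copies text verbatim
theorem pvACore_id (l1 l2 quote : String) (hq : quote.toList.length ≠ 1)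
    (cs : List Char) : pvACore l1 l2 quote cs false = cs := by
  induction cs with
  | nil => simp [pvACore]
  | cons c cs ih =>
    have hq' : ¬ [c] = quote.toList := fun h => hq (by rw [← h]; rfl)
    by_cases hl : [c] = l1.toList
    · simp only [pvACore, if_neg hq', if_pos hl, Bool.false_eq_true, if_false, ih]
      rw [← hl]
      simp
    · simp [pvACore, hq', hl, ih]

-- ===== VERDICT (by name: the statement is the Claim_ definition above) =====
theorem convert_symbol_spec : Claim_equal_convert_symbol := by
  intro text l1 l2 quote _
  unfold Spec_convert_symbol convert_symbol convert_symbol_alt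
  rw [pvFoldl_eq_acore l1 l2 quote text.toList [] false]
  by_cases hq : quote.toList.length = 1
  · rw [if_neg (by simpa using hq)]
    obtain ⟨q, hq1⟩ : ∃ q, quote.toList = [q] := by
      cases h : quote.toList with
      | nil => simp [h] at hq
      | cons a t =>
        cases t with
        | nil => exact ⟨a, rfl⟩
        | cons b u => simp [h] at hq
    rw [hq1, pvSplitOn_eq q text.toList]
    rw [pvEnum_eq_joinParts l1 l2 (pvSpl q text.toList) 0 (by omega)]
    rw [pvACore_eq_joinParts l1 l2 quote q hq1 text.toList false]
    norm_num
  · rw [if_pos (by simpa using hq)]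
    rw [pvACore_id l1 l2 quote hq text.toList]
    simp [String.ofList]
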